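-- pv_equiv track=rewrite | github.com/JoaoVictorfss/AStarAlgorithm | src/utils/Matriz.py | acha_branco
-- ===== SOURCE A (Python) =====
-- def acha_branco(matriz_inicial):
--     x = 0
--     xb = 0
--     yb = 0
--     for i in matriz_inicial:
--         y = 0
--         for j in i:
--             if(j == 0 ):
--                 xb = x
--                 yb = y
--                 break
--             y += 1
--         x += 1
--     return [xb,yb]
-- ===== SOURCE B (Python) =====
-- def acha_branco(matriz_inicial):
--     for k in range(len(matriz_inicial) - 1, -1, -1):
--         linha = matriz_inicial[k]
--         if 0 in linha:
--             return [k, linha.index(0)]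
--     return [0, 0]
-- ===== Notes on version B (the rewrite author's own statement) =====
-- stated objective: alternative
-- what changed: Replaces A's full accumulate-and-overwrite pass over all rows with an early-exit bottom-up scan that returns at the first (last-indexed) row containing a zero.
import Mathlib
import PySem

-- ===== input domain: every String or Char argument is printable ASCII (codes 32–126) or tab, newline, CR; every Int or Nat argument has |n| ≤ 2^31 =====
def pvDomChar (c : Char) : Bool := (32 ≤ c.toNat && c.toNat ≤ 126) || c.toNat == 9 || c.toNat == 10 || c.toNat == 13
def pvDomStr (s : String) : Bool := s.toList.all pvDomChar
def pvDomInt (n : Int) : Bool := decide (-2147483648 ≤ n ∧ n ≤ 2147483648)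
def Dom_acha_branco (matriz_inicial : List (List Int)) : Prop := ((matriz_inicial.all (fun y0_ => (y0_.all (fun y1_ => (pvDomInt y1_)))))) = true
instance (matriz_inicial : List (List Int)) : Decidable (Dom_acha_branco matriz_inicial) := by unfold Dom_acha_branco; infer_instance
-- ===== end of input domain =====

-- B replaces A's accumulate-and-overwrite pass over all rows with an early-exit
-- bottom-up scan (same result; no speed claim proved or measured).

-- ===== PORT A =====
-- inner 'for j in i' loop with break: returns the y at the first zero, none if no zero
def achaInner : List Int → Int → Option Int
  | [], _ => none
  | j :: rest, y => if j = 0 then some y else achaInner rest (y + 1)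

-- outer 'for i in matriz_inicial' loop, state (x, xb, yb)
def achaOuter : List (List Int) → Int → Int → Int → Int × Int
  | [], _, xb, yb => (xb, yb)
  | i :: rest, x, xb, yb =>
    match achaInner i 0 with
    | some y => achaOuter rest (x + 1) x y
    | none => achaOuter rest (x + 1) xb yb

def acha_branco (matriz_inicial : List (List Int)) : List Int :=
  let p := achaOuter matriz_inicial 0 0 0
  [p.1, p.2]

-- ===== PORT B =====
-- 'for k in range(len(m)-1, -1, -1)': iterate the enumerated rows in reverse order
def altGo : List (Int × List Int) → List Int
  | [] => [0, 0]
  | (k, linha) :: rest =>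
    if linha.contains 0 then [k, (((PySem.List.index? linha 0).getD 0 : Nat) : Int)]
    else altGo rest

def acha_branco_alt (matriz_inicial : List (List Int)) : List Int :=
  altGo (PySem.List.enumerate matriz_inicial 0).reverse

-- ===== PRECONDITION & SPEC =====
def Spec_acha_branco (matriz_inicial : List (List Int)) (out : List Int) : Prop := out = acha_branco_alt matriz_inicial
instance (matriz_inicial : List (List Int)) (out : List Int) : Decidable (Spec_acha_branco matriz_inicial out) := by unfold Spec_acha_branco; infer_instance

-- ===== CLAIM (what is proved, stated in full; the proofs are below) =====
def Claim_equal_acha_branco : Prop := ∀ (matriz_inicial : List (List Int)), Dom_acha_branco matriz_inicial → Spec_acha_branco matriz_inicial (acha_branco matriz_inicial)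

-- ===== LEMMAS AND PROOFS =====

theorem achaInner_eq (r : List Int) : ∀ (c : Int),
    achaInner r c = (PySem.List.index? r 0).map (fun n : Nat => c + (n : Int)) := by
  induction r with
  | nil => intro c; simp [achaInner]
  | cons j rest ih =>
    intro c
    by_cases h : j = 0
    · subst h
      rw [PySem.List.index?_cons_self]
      simp [achaInner]
    · rw [PySem.List.index?_cons_of_ne rest h]
      simp only [achaInner, if_neg h, ih (c + 1)]
      cases PySem.List.index? rest 0 with
      | none => rfl
      | some n =>
        simp only [Option.map_some, Option.some.injEq]
        push_cast
        ring

theorem outer_append_some (rows : List (List Int)) (r : List Int) (y : Int)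
    (h : achaInner r 0 = some y) :
    ∀ x xb yb, achaOuter (rows ++ [r]) x xb yb = (x + rows.length, y) := by
  induction rows with
  | nil =>
    intro x xb yb
    simp [achaOuter, h]
  | cons i rest ih =>
    intro x xb yb
    simp only [List.cons_append, achaOuter]
    cases achaInner i 0 with
    | none =>
      show achaOuter (rest ++ [r]) (x + 1) xb yb = _
      rw [ih]; simp [Prod.ext_iff]; omega
    | some y' =>
      show achaOuter (rest ++ [r]) (x + 1) x y' = _
      rw [ih (x + 1) x y']; simp [Prod.ext_iff]; omega

theorem outer_append_none (rows : List (List Int)) (r : List Int)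
    (h : achaInner r 0 = none) :
    ∀ x xb yb, achaOuter (rows ++ [r]) x xb yb = achaOuter rows x xb yb := by
  induction rows with
  | nil =>
    intro x xb yb
    simp [achaOuter, h]
  | cons i rest ih =>
    intro x xb yb
    simp only [List.cons_append, achaOuter]
    cases achaInner i 0 with
    | none => exact ih _ _ _
    | some y' => exact ih _ _ _

theorem main_eq (rows : List (List Int)) :
    acha_branco rows = acha_branco_alt rows := by
  induction rows using List.reverseRecOn with
  | nil => rfl
  | append_singleton rows r ih =>
    unfold acha_branco acha_branco_alt
    rw [PySem.List.enumerate_append]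
    simp only [PySem.List.enumerate_cons, PySem.List.enumerate_nil, List.reverse_append,
      List.reverse_cons, List.reverse_nil, List.nil_append, List.cons_append, altGo]
    cases h : PySem.List.index? r 0 with
    | none =>
      have hnm : (0 : Int) ∉ r := (PySem.List.index?_eq_none_iff r 0).mp h
      have hc : r.contains 0 = false := by simpa using hnm
      rw [hc, outer_append_none rows r (by rw [achaInner_eq r 0, h]; rfl)]
      simpa [acha_branco, acha_branco_alt] using ih
    | some n =>
      have hm : (0 : Int) ∈ r := by
        have := (PySem.List.index?_isSome_iff r 0).mp (by rw [h]; rfl)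
        exact this
      have hc : r.contains 0 = true := by simpa using hm
      rw [hc, outer_append_some rows r (0 + (n : Int)) (by rw [achaInner_eq r 0, h]; rfl)]
      simp

-- ===== VERDICT (by name: the statement is the Claim_ definition above) =====
theorem acha_branco_spec : Claim_equal_acha_branco := by
  intro m _
  unfold Spec_acha_branco
  exact main_eq m
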